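-- pv_equiv track=rewrite | github.com/brianrainer/leetcode-grind | codeforces-0940-div2/a_solve.py | solve
-- ===== SOURCE A (Python) =====
-- from collections import defaultdict
--
-- def solve(l):
--     d = defaultdict(int)
--
--     for x in l:
--         d[x]+=1
--
--     res = 0
--     for v in d.values():
--         res += v//3
--
--     return res
-- ===== SOURCE B (Python) =====
-- def solve(l):
--     # Sort a fresh copy, then a single run-length scan: each time the run of
--     # equal elements ends, add run//3. (Does not mutate the argument.)
--     s = sorted(l)
--     if not s:
--         return 0
--     res = 0
--     cur = s[0]
--     run = 1
--     for x in s[1:]: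
--         if x == cur:
--             run += 1
--         else:
--             res += run // 3
--             cur = x
--             run = 1
--     return res + run // 3
-- ===== Notes on version B (the rewrite author's own statement) =====
-- stated objective: alternative
-- what changed: Replaces the frequency-dictionary pass (defaultdict counting, then summing v//3 over the values) by sorting a copy of the list and a single run-length scan that adds run//3 at each run boundary.
import Mathlib
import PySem

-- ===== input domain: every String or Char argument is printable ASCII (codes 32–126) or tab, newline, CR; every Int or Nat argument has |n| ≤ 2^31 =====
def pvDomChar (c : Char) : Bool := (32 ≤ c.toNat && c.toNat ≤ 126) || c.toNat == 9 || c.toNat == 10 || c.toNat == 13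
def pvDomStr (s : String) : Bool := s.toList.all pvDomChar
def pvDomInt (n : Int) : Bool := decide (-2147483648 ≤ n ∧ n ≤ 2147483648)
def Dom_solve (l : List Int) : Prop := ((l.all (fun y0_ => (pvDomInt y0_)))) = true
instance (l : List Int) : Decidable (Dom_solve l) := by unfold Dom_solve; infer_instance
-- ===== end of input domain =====

-- B replaces A's frequency-dictionary pass by sort-then-run-length-scan (alternative algorithm, same result).

-- ===== PORT A =====
def solve (l : List Int) : Int :=
  let d := l.foldl (fun d x => PySem.Dict.modify d x 0 (· + 1)) PySem.Dict.empty
  (PySem.Dict.values d).foldl (fun res v => res + PySem.Int.floordiv v 3) 0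

-- ===== PORT B =====
-- the for-loop over s[1:], state (res=acc, cur, run)
def runScan : List Int → Int → Int → Int → Int
  | [], _, run, acc => acc + PySem.Int.floordiv run 3
  | y :: ys, cur, run, acc =>
    if y = cur then runScan ys cur (run + 1) acc
    else runScan ys y 1 (acc + PySem.Int.floordiv run 3)

def solve_alt (l : List Int) : Int :=
  match PySem.List.sorted l (fun x => x) false with
  | [] => 0
  | x :: xs => runScan xs x 1 0

-- ===== PRECONDITION & SPEC =====
def Spec_solve (l : List Int) (out : Int) : Prop := out = solve_alt l
instance (l : List Int) (out : Int) : Decidable (Spec_solve l out) := by unfold Spec_solve; infer_instance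

-- ===== CLAIM (what is proved, stated in full; the proofs are below) =====
def Claim_equal_solve : Prop := ∀ (l : List Int), Dom_solve l → Spec_solve l (solve l)

-- ===== LEMMAS AND PROOFS =====

-- sum over the distinct elements of l of (count // 3): both programs compute this
def Fsum (l : List Int) : Int :=
  ((PySem.Set.ofList l).map (fun k => PySem.Int.floordiv (l.count k : Int) 3)).sum

lemma Fsum_eq_of (l : List Int) (s : List Int) (hnd : s.Nodup)
    (hmem : ∀ k, k ∈ s ↔ k ∈ l) :
    (s.map (fun k => PySem.Int.floordiv (l.count k : Int) 3)).sum = Fsum l := by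
  have hperm : s.Perm (PySem.Set.ofList l) := by
    rw [List.perm_ext_iff_of_nodup hnd (PySem.Set.nodup_ofList l)]
    intro k
    rw [hmem, PySem.Set.mem_ofList]
  exact (hperm.map _).sum_eq

lemma solve_eq_Fsum (l : List Int) : solve l = Fsum l := by
  show (PySem.Dict.values (l.foldl (fun d x => PySem.Dict.modify d x 0 (· + 1)) PySem.Dict.empty)).foldl
      (fun res v => res + PySem.Int.floordiv v 3) 0 = Fsum l
  rw [← PySem.Dict.counter_eq_foldl]
  have hv : PySem.Dict.values (PySem.Dict.counter l)
      = (PySem.Set.ofList l).map (fun k => (l.count k : Int)) := by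
    simp only [PySem.Dict.values, PySem.Dict.items_counter, List.map_map]
    rfl
  rw [hv, PySem.List.foldl_add]
  rw [List.map_map]
  have := Fsum_eq_of l (PySem.Set.ofList l) (PySem.Set.nodup_ofList l)
      (fun k => PySem.Set.mem_ofList l k)
  simpa using this

lemma Fsum_cons (y : Int) (ys : List Int) :
    Fsum (y :: ys)
      = PySem.Int.floordiv ((ys.count y : Int) + 1) 3
        + Fsum (ys.filter (fun z => z ≠ y)) := by
  have hnd : (y :: PySem.Set.ofList (ys.filter (fun z => z ≠ y))).Nodup := by
    refine List.nodup_cons.2 ⟨?_, PySem.Set.nodup_ofList _⟩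
    intro hy
    rw [PySem.Set.mem_ofList, List.mem_filter] at hy
    simp at hy
  have hmem : ∀ k, k ∈ (y :: PySem.Set.ofList (ys.filter (fun z => z ≠ y))) ↔ k ∈ (y :: ys) := by
    intro k
    by_cases hk : k = y
    · subst hk; simp
    · simp [PySem.Set.mem_ofList, List.mem_filter, hk]
  have h := Fsum_eq_of (y :: ys) _ hnd hmem
  rw [← h]
  simp only [List.map_cons, List.sum_cons]
  congr 1
  · rw [show (((y :: ys).count y : Nat) : Int) = ((ys.count y : Nat) : Int) + 1 from by
      simp]
  · unfold Fsum
    apply congrArg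
    apply List.map_congr_left
    intro k hk
    rw [PySem.Set.mem_ofList, List.mem_filter] at hk
    have hky : k ≠ y := by simpa using hk.2
    congr 1
    rw [List.count_filter (by simpa using hky)]
    simp [Ne.symm hky]

lemma Fsum_perm {l l' : List Int} (h : l.Perm l') : Fsum l = Fsum l' := by
  rw [← Fsum_eq_of l' (PySem.Set.ofList l) (PySem.Set.nodup_ofList l)
      (fun k => by rw [PySem.Set.mem_ofList l k]; exact ⟨fun hm => h.mem_iff.1 hm, fun hm => h.mem_iff.2 hm⟩)]
  unfold Fsum
  apply congrArg
  apply List.map_congr_left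
  intro k _
  rw [h.count_eq]

lemma runScan_spec (xs : List Int) : ∀ (cur run acc : Int),
    (cur :: xs).Pairwise (· ≤ ·) →
    runScan xs cur run acc
      = acc + PySem.Int.floordiv (run + (xs.count cur : Int)) 3
        + Fsum (xs.filter (fun z => z ≠ cur)) := by
  induction xs with
  | nil =>
    intro cur run acc _
    simp [runScan, Fsum, PySem.Set.ofList]
  | cons y ys ih =>
    intro cur run acc h
    by_cases he : y = cur
    · subst he
      rw [runScan, if_pos rfl]
      have hp : (y :: ys).Pairwise (· ≤ ·) := by
        have : (y :: ys).Sublist (y :: y :: ys) := by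
          exact List.cons_sublist_cons.2 (List.sublist_cons_self y ys)
        exact h.sublist this
      rw [ih y (run + 1) acc hp]
      have hc : run + 1 + (ys.count y : Int) = run + (((y :: ys).count y : Nat) : Int) := by
        rw [List.count_cons_self]; push_cast; ring
      rw [hc]
      have hf : (y :: ys).filter (fun z => z ≠ y) = ys.filter (fun z => z ≠ y) := by
        simp
      rw [hf]
    · rw [runScan, if_neg he]
      have hp : (y :: ys).Pairwise (· ≤ ·) := h.tail
      rw [ih y 1 (acc + PySem.Int.floordiv run 3) hp]
      -- cur does not occur in y :: ys
      have hcury : cur ≤ y := (List.pairwise_cons.1 h).1 y (List.mem_cons_self)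
      have hnm : cur ∉ (y :: ys) := by
        intro hm
        rcases List.mem_cons.1 hm with h1 | h2
        · exact he h1.symm
        · have hyc : y ≤ cur := (List.pairwise_cons.1 hp).1 cur h2
          exact he (le_antisymm hcury hyc).symm
      have hcnt : (y :: ys).count cur = 0 := List.count_eq_zero.2 hnm
      have hfilt : (y :: ys).filter (fun z => z ≠ cur) = y :: ys := by
        apply List.filter_eq_self.2
        intro z hz
        simp only [ne_eq, decide_eq_true_eq]
        intro hzc; subst hzc; exact hnm hz
      rw [hcnt, hfilt, Fsum_cons]
      have h1 : (1 : Int) + (ys.count y : Int) = (ys.count y : Int) + 1 := by ring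
      rw [h1]
      simp only [Nat.cast_zero, add_zero]
      ring

lemma solve_alt_eq_Fsum (l : List Int) : solve_alt l = Fsum l := by
  unfold solve_alt
  cases hs : PySem.List.sorted l (fun x => x) false with
  | nil =>
    have hl : l = [] := by
      have := PySem.List.sorted_eq_nil_iff (xs := l) (key := fun x => x) (rev := false)
      exact this.1 hs
    subst hl
    show (0 : Int) = Fsum []
    simp [Fsum, PySem.Set.ofList]
  | cons x xs =>
    have hperm : (x :: xs).Perm l := by
      have := PySem.List.sorted_perm (xs := l) (key := fun x => x) (rev := false)
      rwa [hs] at this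
    have hpw : (x :: xs).Pairwise (· ≤ ·) := by
      have := PySem.List.sorted_pairwise (xs := l) (key := fun x => x)
      rwa [hs] at this
    show runScan xs x 1 0 = Fsum l
    rw [runScan_spec xs x 1 0 hpw]
    rw [← Fsum_perm hperm, Fsum_cons]
    rw [show (1 : Int) + (xs.count x : Int) = (xs.count x : Int) + 1 from by ring]
    ring

-- ===== VERDICT (by name: the statement is the Claim_ definition above) =====
theorem solve_spec : Claim_equal_solve := by
  intro l _
  unfold Spec_solve
  rw [solve_eq_Fsum, solve_alt_eq_Fsum]
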